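-- pv_equiv track=rewrite | github.com/LeoCrge/OperationResearchProject | main.py | fix_cycles
-- ===== SOURCE A (Python) =====
-- def from_node_to_matrix(cycle, n): #n the number of provisions
--     cells = []
--
--     for k in range(len(cycle)-1):
--         a =cycle[k]
--         b =cycle[k+1]
--         if a < n: # row to column
--             i = a
--             j = b - n
--         else:
--             i = b
--             j = a - n
--         cells.append((i, j))
--     return cells
--
-- def fix_cycles(proposal, cycle_nodes, n, basic_cells_set, best_cell):
--
--     cycle = from_node_to_matrix(cycle_nodes, n)
--
--     if best_cell in cycle:
--         index = cycle.index(best_cell)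
--         cycle = cycle[index:] + cycle[:index]
--     delta = min(proposal[i][j] for k, (i, j) in enumerate(cycle) if k % 2 == 1)
--
--     for k, (i, j) in enumerate(cycle):
--         if k % 2 == 0:
--             proposal[i][j] += delta
--         else:
--             proposal[i][j] -= delta
--
--     # remove the variable (first zero in - position)
--     for k in range(1, len(cycle), 2):
--         i, j = cycle[k]
--         if proposal[i][j] == 0:
--             basic_cells_set.remove((i, j))
--             break
--
--
--     return proposal, basic_cells_set
-- ===== SOURCE B (Python) =====
-- def fix_cycles(proposal, cycle_nodes, n, basic_cells_set, best_cell):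
--     # matrix cells of the cycle, from consecutive node pairs
--     cells = [(a, b - n) if a < n else (b, a - n)
--              for a, b in zip(cycle_nodes, cycle_nodes[1:])]
--     # rotate so the entering cell comes first
--     if best_cell in cells:
--         idx = cells.index(best_cell)
--         cells = cells[idx:] + cells[:idx]
--     evens, odds = cells[0::2], cells[1::2]
--     delta = min(proposal[i][j] for i, j in odds)
--     for i, j in evens:
--         proposal[i][j] += delta
--     for i, j in odds:
--         proposal[i][j] -= delta
--     # drop the first odd cell driven to zero from the basis
--     for i, j in odds:
--         if proposal[i][j] == 0:
--             basic_cells_set.remove((i, j))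
--             break
--     return proposal, basic_cells_set
-- ===== Notes on version B (the rewrite author's own statement) =====
-- stated objective: alternative
-- what changed: B splits the rotated cycle once into even/odd cell slices, takes the minimum over the materialised odd slice, and applies all +delta updates and then all -delta updates in two plain loops (the per-cell additions commute, so the traversal order does not matter), instead of A's single enumerate loop with k%2 parity tests and its range(1,len,2)-indexed removal scan.
import Mathlib
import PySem

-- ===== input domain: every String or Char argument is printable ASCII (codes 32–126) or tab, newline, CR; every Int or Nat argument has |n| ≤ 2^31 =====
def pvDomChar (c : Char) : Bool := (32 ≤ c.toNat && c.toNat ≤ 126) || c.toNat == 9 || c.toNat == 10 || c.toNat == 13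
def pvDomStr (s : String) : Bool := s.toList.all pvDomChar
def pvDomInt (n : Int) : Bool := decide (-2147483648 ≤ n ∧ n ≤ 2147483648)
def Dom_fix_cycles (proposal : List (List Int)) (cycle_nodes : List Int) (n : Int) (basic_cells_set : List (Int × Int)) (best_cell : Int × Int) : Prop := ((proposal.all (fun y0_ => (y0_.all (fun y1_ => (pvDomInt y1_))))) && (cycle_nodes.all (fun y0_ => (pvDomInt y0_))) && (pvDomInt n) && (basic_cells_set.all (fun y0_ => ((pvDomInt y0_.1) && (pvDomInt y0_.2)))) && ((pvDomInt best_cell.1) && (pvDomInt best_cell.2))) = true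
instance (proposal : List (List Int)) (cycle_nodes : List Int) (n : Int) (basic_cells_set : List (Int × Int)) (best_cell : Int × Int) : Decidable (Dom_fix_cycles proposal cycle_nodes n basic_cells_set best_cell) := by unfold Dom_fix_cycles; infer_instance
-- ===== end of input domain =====

-- B splits the cycle into even/odd cell slices and applies all +delta then all -delta updates
-- in two plain loops (the additions commute), instead of A's enumerate loop with parity tests
-- (objective: alternative decomposition). Both Pythons mutate proposal and basic_cells_set in
-- place; the equivalence proved here is about the RETURN value.

-- matrix-access helpers: proposal[i][j] read / write with Python index semantics
-- (exact for every index Python accepts; the `.getD` defaults are reached only where Python raises IndexError, which Pre_ excludes)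
def pvGetIJ (p : List (List Int)) (i j : Int) : Int :=
  ((PySem.List.pyGet? p i).bind (fun row => PySem.List.pyGet? row j)).getD 0

def pvSetIJ (p : List (List Int)) (i j v : Int) : List (List Int) :=
  match PySem.List.pyGet? p i with
  | none => p
  | some row =>
    match PySem.List.pySet? row j v with
    | none => p
    | some row' => (PySem.List.pySet? p i row').getD p

-- the matrix position an index pair addresses (negative indices count from the end);
-- used by Pre_'s leaving-cell condition (the `.getD []` is reached only where Python raises IndexError, which Pre_ excludes)
def pvPos (p : List (List Int)) (i j : Int) : Int × Int :=
  let i2 := if i < 0 then i + (p.length : Int) else i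
  let j2 := if j < 0 then j + ((((PySem.List.pyGet? p i2).getD []).length : Int)) else j
  (i2, j2)

-- ===== PORT A =====
def from_node_to_matrix (cycle : List Int) (n : Int) : List (Int × Int) :=
  (PySem.List.pyRange 0 ((cycle.length : Int) - 1) 1).foldl (fun cells k =>
    let a := PySem.List.pyGetD cycle k 0
    let b := PySem.List.pyGetD cycle (k + 1) 0
    cells ++ [if a < n then (a, b - n) else (b, a - n)]) []

-- A's removal loop 'for k in range(1, len(cycle), 2): … break' (the `.getD s` is reached only
-- where Python's list.remove raises ValueError, which Pre_ excludes)
def pvRemoveA (proposal : List (List Int)) (cycle : List (Int × Int)) (ks : List Int) (s : List (Int × Int)) : List (Int × Int) :=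
  match ks with
  | [] => s
  | k :: rest =>
    let c := PySem.List.pyGetD cycle k (0, 0)
    if pvGetIJ proposal c.1 c.2 == 0 then (PySem.List.remove? s c).getD s
    else pvRemoveA proposal cycle rest s

def fix_cycles (proposal : List (List Int)) (cycle_nodes : List Int) (n : Int) (basic_cells_set : List (Int × Int)) (best_cell : Int × Int) : List (List Int) × (List (Int × Int)) :=
  let cycle := from_node_to_matrix cycle_nodes n
  let cycle := if best_cell ∈ cycle then
      let index := (PySem.List.index? cycle best_cell).getD 0
      PySem.List.slice cycle (some (index : Int)) none ++ PySem.List.slice cycle none (some (index : Int))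
    else cycle
  let delta := (PySem.List.min? ((PySem.List.enumerate cycle 0).filterMap (fun kc =>
      if PySem.Int.mod kc.1 2 == 1 then some (pvGetIJ proposal kc.2.1 kc.2.2) else none)) (fun x => x)).getD 0
  let proposal := (PySem.List.enumerate cycle 0).foldl (fun p kc =>
      if PySem.Int.mod kc.1 2 == 0 then pvSetIJ p kc.2.1 kc.2.2 (pvGetIJ p kc.2.1 kc.2.2 + delta)
      else pvSetIJ p kc.2.1 kc.2.2 (pvGetIJ p kc.2.1 kc.2.2 - delta)) proposal
  let basic_cells_set := pvRemoveA proposal cycle (PySem.List.pyRange 1 (cycle.length : Int) 2) basic_cells_set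
  (proposal, basic_cells_set)

-- ===== PORT B =====
-- B's removal loop 'for (i, j) in odds: … break' (same remark on `.getD s` as for A)
def pvRemoveB (proposal : List (List Int)) (odds : List (Int × Int)) (s : List (Int × Int)) : List (Int × Int) :=
  match odds with
  | [] => s
  | c :: rest =>
    if pvGetIJ proposal c.1 c.2 == 0 then (PySem.List.remove? s c).getD s
    else pvRemoveB proposal rest s

def fix_cycles_alt (proposal : List (List Int)) (cycle_nodes : List Int) (n : Int) (basic_cells_set : List (Int × Int)) (best_cell : Int × Int) : List (List Int) × (List (Int × Int)) :=
  let cells := (cycle_nodes.zip (cycle_nodes.drop 1)).map (fun ab =>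
      if ab.1 < n then (ab.1, ab.2 - n) else (ab.2, ab.1 - n))
  let cells := if best_cell ∈ cells then
      let idx := (PySem.List.index? cells best_cell).getD 0
      PySem.List.slice cells (some (idx : Int)) none ++ PySem.List.slice cells none (some (idx : Int))
    else cells
  let evens := (PySem.List.slice? cells (some 0) none 2).getD []
  let odds := (PySem.List.slice? cells (some 1) none 2).getD []
  let delta := (PySem.List.min? (odds.map (fun c => pvGetIJ proposal c.1 c.2)) (fun x => x)).getD 0
  let proposal := evens.foldl (fun q c => pvSetIJ q c.1 c.2 (pvGetIJ q c.1 c.2 + delta)) proposal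
  let proposal := odds.foldl (fun q c => pvSetIJ q c.1 c.2 (pvGetIJ q c.1 c.2 - delta)) proposal
  let basic_cells_set := pvRemoveB proposal odds basic_cells_set
  (proposal, basic_cells_set)

-- a cell (i, j) indexes proposal validly in Python's sense (negative indices count from the end)
abbrev pvInR (p : List (List Int)) (c : Int × Int) : Prop :=
  -(p.length : Int) ≤ c.1 ∧ c.1 < (p.length : Int) ∧
  -(((p.getD (if c.1 < 0 then c.1 + p.length else c.1).toNat []).length : Int)) ≤ c.2 ∧
  c.2 < (((p.getD (if c.1 < 0 then c.1 + p.length else c.1).toNat []).length : Int))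

def pvCoef (k : Int) : Int := if PySem.Int.mod k 2 == 0 then 1 else -1

def pvNetF (p : List (List Int)) (cells : List (Int × Int)) (k0 : Int) (c : Int × Int) : Int :=
  ((PySem.List.enumerate cells k0).map (fun kc =>
    if pvPos p kc.2.1 kc.2.2 = c then pvCoef kc.1 else 0)).sum

-- ===== PRECONDITION & SPEC =====
-- Pre_ admits exactly the function's natural domain: cycle cells that index proposal within
-- Python's index range (a malformed cycle gives IndexError), at least two
-- cycle cells (min() of an empty generator raises ValueError), and, when some odd-position
-- cell of the rotated cycle ends at value zero (its original value plus delta times the cell's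
-- net +1/-1 coefficient over the cycle), the first such cell present in basic_cells_set
-- (else list.remove raises ValueError).
def Pre_fix_cycles (proposal : List (List Int)) (cycle_nodes : List Int) (n : Int) (basic_cells_set : List (Int × Int)) (best_cell : Int × Int) : Prop :=
  let cells := (cycle_nodes.zip (cycle_nodes.drop 1)).map (fun ab =>
      if ab.1 < n then (ab.1, ab.2 - n) else (ab.2, ab.1 - n))
  let idx := (PySem.List.index? cells best_cell).getD 0
  let rot := if best_cell ∈ cells then cells.drop idx ++ cells.take idx else cells
  let odds := (rot.zipIdx.filter (fun kc => kc.2 % 2 = 1)).map (·.1)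
  let delta := (PySem.List.min? (odds.map (fun c => pvGetIJ proposal c.1 c.2)) (fun x => x)).getD 0
  2 ≤ cells.length ∧
  (∀ c ∈ cells, pvInR proposal c) ∧
  (((odds.find? (fun c => pvGetIJ proposal c.1 c.2 + delta * pvNetF proposal rot 0 (pvPos proposal c.1 c.2) == 0)).map
      (fun c => decide (c ∈ basic_cells_set))).getD true = true)

instance (proposal : List (List Int)) (cycle_nodes : List Int) (n : Int) (basic_cells_set : List (Int × Int)) (best_cell : Int × Int) : Decidable (Pre_fix_cycles proposal cycle_nodes n basic_cells_set best_cell) := by unfold Pre_fix_cycles; infer_instance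

def pvWitness_fix_cycles : List (List Int) × List Int × Int × (List (Int × Int)) × (Int × Int) :=
  ([[1, 2], [3, 4]], [0, 1, 0], 1, [(0, 0)], (0, 0))

def Spec_fix_cycles (proposal : List (List Int)) (cycle_nodes : List Int) (n : Int) (basic_cells_set : List (Int × Int)) (best_cell : Int × Int) (out : List (List Int) × (List (Int × Int))) : Prop := out = fix_cycles_alt proposal cycle_nodes n basic_cells_set best_cell
instance (proposal : List (List Int)) (cycle_nodes : List Int) (n : Int) (basic_cells_set : List (Int × Int)) (best_cell : Int × Int) (out : List (List Int) × (List (Int × Int))) : Decidable (Spec_fix_cycles proposal cycle_nodes n basic_cells_set best_cell out) := by unfold Spec_fix_cycles; infer_instance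

-- ===== CLAIM (what is proved, stated in full; the proofs are below) =====
def Claim_equal_fix_cycles : Prop := ∀ (proposal : List (List Int)) (cycle_nodes : List Int) (n : Int) (basic_cells_set : List (Int × Int)) (best_cell : Int × Int), Dom_fix_cycles proposal cycle_nodes n basic_cells_set best_cell → Pre_fix_cycles proposal cycle_nodes n basic_cells_set best_cell → Spec_fix_cycles proposal cycle_nodes n basic_cells_set best_cell (fix_cycles proposal cycle_nodes n basic_cells_set best_cell)

-- ===== LEMMAS AND PROOFS =====

def pvEveryOther {α : Type} : List α → List α
  | [] => []
  | [x] => [x]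
  | x :: _ :: r => x :: pvEveryOther r

theorem pvEveryOther_getElem? {α : Type} (l : List α) (t : Nat) :
    (pvEveryOther l)[t]? = l[2 * t]? := by
  induction l using pvEveryOther.induct generalizing t with
  | case1 => simp [pvEveryOther]
  | case2 x =>
    match t with
    | 0 => simp [pvEveryOther]
    | t + 1 => simp [pvEveryOther]
  | case3 x y r ih =>
    match t with
    | 0 => simp [pvEveryOther]
    | t + 1 =>
      rw [show 2 * (t + 1) = 2 * t + 1 + 1 by ring]
      simpa [pvEveryOther] using ih t

theorem pvCells_eq (cyc : List Int) (n : Int) :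
    from_node_to_matrix cyc n = (cyc.zip (cyc.drop 1)).map (fun ab =>
      if ab.1 < n then (ab.1, ab.2 - n) else (ab.2, ab.1 - n)) := by
  unfold from_node_to_matrix
  rw [PySem.List.foldl_append_singleton_eq_map]
  simp only [List.nil_append]
  apply List.ext_getElem
  · simp [PySem.List.length_pyRange_one, List.length_zip]
  · intro k h1 h2
    simp only [List.getElem_map, PySem.List.getElem_pyRange_one, zero_add]
    have hk : k < cyc.length - 1 := by
      simp [PySem.List.length_pyRange_one] at h1; omega
    have e1 : PySem.List.pyGet? cyc (↑k) = some (cyc[k]'(by omega)) := by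
      rw [PySem.List.pyGet?_natCast]; exact List.getElem?_eq_getElem (by omega)
    have e2 : PySem.List.pyGet? cyc ((k : Int) + 1) = some (cyc[k + 1]'(by omega)) := by
      rw [PySem.List.pyGet?_of_nonneg _ (by omega)]
      have ht : ((k : Int) + 1).toNat = k + 1 := by omega
      rw [ht]; exact List.getElem?_eq_getElem (by omega)
    simp [List.getElem_zip, PySem.List.pyGetD, e1, e2]

theorem pvEO_drop_getElem? {α : Type} (l : List α) (t : Nat) :
    (pvEveryOther (l.drop 1))[t]? = l[2 * t + 1]? := by
  rw [pvEveryOther_getElem?, List.getElem?_drop]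
  congr 1; omega

theorem pvFilterMapIdx {α : Type} (r : List α) :
    List.filterMap (fun k => r[2 * k]?) (List.range ((r.length + 1) / 2)) = pvEveryOther r := by
  induction r using pvEveryOther.induct with
  | case1 => simp [pvEveryOther]
  | case2 x => simp [pvEveryOther, List.range_succ]
  | case3 x y r ih =>
    have hc : ((x :: y :: r).length + 1) / 2 = (r.length + 1) / 2 + 1 := by simp; omega
    rw [hc, List.range_succ_eq_map, List.filterMap_cons, List.filterMap_map]
    simp only [Nat.mul_zero, List.getElem?_cons_zero, Function.comp_def]
    have he : ∀ k : Nat, (x :: y :: r)[2 * (k + 1)]? = r[2 * k]? := by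
      intro k
      rw [show 2 * (k + 1) = 2 * k + 1 + 1 by ring]
      simp
    simp only [he, ih, pvEveryOther]

theorem pvOddsSlice_eq {α : Type} (l : List α) :
    (PySem.List.slice? l (some 1) none 2).getD [] = pvEveryOther (l.drop 1) := by
  match l with
  | [] => rfl
  | x :: r =>
    simp only [PySem.List.slice?, PySem.List.sliceIndices]
    norm_num
    have hcnt : (if 0 < r.length then (((r.length : Int) + 2 - 1) / 2).toNat else 0) = (r.length + 1) / 2 := by
      split <;> omega
    rw [hcnt]
    rw [← pvFilterMapIdx r]
    apply List.filterMap_congr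
    intro k _
    rw [show ((1:Int) + 2 * (k:Int)).toNat = 2 * k + 1 by omega]
    simp

theorem pvEvensSlice_eq {α : Type} (l : List α) :
    (PySem.List.slice? l (some 0) none 2).getD [] = pvEveryOther l := by
  simp only [PySem.List.slice?, PySem.List.sliceIndices]
  norm_num
  have hcnt : (if 0 < l.length then (((l.length : Int) + 2 - 1) / 2).toNat else 0) = (l.length + 1) / 2 := by
    split <;> omega
  rw [hcnt, ← pvFilterMapIdx l]
  apply List.filterMap_congr
  intro k _
  rw [show ((2:Int) * (k:Int)).toNat = 2 * k by omega]

theorem pvRangeOdd_map (l : List (Int × Int)) :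
    (PySem.List.pyRange 1 (l.length : Int) 2).map (fun k => PySem.List.pyGetD l k (0, 0)) =
      pvEveryOther (l.drop 1) := by
  rw [PySem.List.pyRange_of_pos _ _ (by omega : (0:Int) < 2)]
  apply List.ext_getElem?
  intro t
  rw [pvEO_drop_getElem?]
  have hcnt : (if (1:Int) < (l.length:Int) then (((l.length:Int) - 1 + 2 - 1) / 2).toNat else 0) = l.length / 2 := by
    split <;> omega
  rw [hcnt]
  by_cases ht : t < l.length / 2
  · have hin : 2 * t + 1 < l.length := by omega
    rw [List.getElem?_map, List.getElem?_map, List.getElem?_range ht]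
    simp only [Option.map_some]
    rw [PySem.List.pyGetD, PySem.List.pyGet?_of_nonneg _ (by omega)]
    have : ((1:Int) + 2 * (t:Int)).toNat = 2 * t + 1 := by omega
    simp [this, List.getElem?_eq_getElem hin]
  · rw [List.getElem?_map, List.getElem?_map, List.getElem?_eq_none (by simpa using ht), List.getElem?_eq_none (by omega)]
    rfl

theorem pvEveryOther_cons {α : Type} (y : α) (r : List α) :
    pvEveryOther (y :: r) = y :: pvEveryOther (r.drop 1) := by
  match r with
  | [] => rfl
  | z :: r' => rfl

theorem pvEveryOther_subset {α : Type} (l : List α) (c : α) (h : c ∈ pvEveryOther l) : c ∈ l := by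
  induction l using pvEveryOther.induct with
  | case1 => simp [pvEveryOther] at h
  | case2 x => simpa [pvEveryOther] using h
  | case3 x y r ih =>
    simp only [pvEveryOther, List.mem_cons] at h ⊢
    rcases h with h | h
    · exact Or.inl h
    · exact Or.inr (Or.inr (ih h))

theorem pvFilterMapOdd_aux (l : List (Int × Int)) (f : Int × Int → Int) (s : Nat) :
    (PySem.List.enumerate l (2 * (s : Int))).filterMap (fun kc =>
      if PySem.Int.mod kc.1 2 == 1 then some (f kc.2) else none) =
    (pvEveryOther (l.drop 1)).map f := by
  induction l using pvEveryOther.induct generalizing s with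
  | case1 => simp [PySem.List.enumerate, pvEveryOther]
  | case2 x =>
    have h0 : PySem.Int.mod (2 * (s : Int)) 2 = 0 := by
      rw [PySem.Int.mod_eq_emod_of_pos (by omega)]; omega
    simp [PySem.List.enumerate, pvEveryOther]
  | case3 x y r ih =>
    have h0 : PySem.Int.mod (2 * (s : Int)) 2 = 0 := by
      rw [PySem.Int.mod_eq_emod_of_pos (by omega)]; omega
    have h1 : PySem.Int.mod (2 * (s : Int) + 1) 2 = 1 := by
      rw [PySem.Int.mod_eq_emod_of_pos (by omega)]; omega
    have h2 : 2 * (s : Int) + 1 + 1 = 2 * ((s + 1 : Nat) : Int) := by push_cast; ring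
    rw [PySem.List.enumerate_cons, List.filterMap_cons, PySem.List.enumerate_cons, List.filterMap_cons, h2]
    simp only [h0, h1, ih (s + 1)]
    norm_num
    rw [pvEveryOther_cons, List.drop_one]
    simp

theorem pvFilterMapOdd_eq (l : List (Int × Int)) (f : Int × Int → Int) :
    (PySem.List.enumerate l 0).filterMap (fun kc =>
      if PySem.Int.mod kc.1 2 == 1 then some (f kc.2) else none) =
    (pvEveryOther (l.drop 1)).map f := by
  have h := pvFilterMapOdd_aux l f 0
  rw [show (2 * ((0 : Nat) : Int)) = 0 by norm_num] at h
  exact h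

theorem pvSetIJ_length (p : List (List Int)) (a b v : Int) : (pvSetIJ p a b v).length = p.length := by
  unfold pvSetIJ
  split
  · rfl
  · split
    · rfl
    · simp [PySem.List.pySet?]
      cases h : PySem.List.pyIdx? p.length a <;> simp

theorem pvSetIJ_row_length (p : List (List Int)) (a b v : Int) (t : Nat) :
    ((pvSetIJ p a b v).getD t []).length = (p.getD t []).length := by
  unfold pvSetIJ
  split
  · rfl
  · rename_i row hrow
    split
    · rfl
    · rename_i row' hrow'
      simp only [PySem.List.pySet?] at hrow' ⊢
      cases hi : PySem.List.pyIdx? row.length b with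
      | none => simp [hi] at hrow'
      | some kb =>
        simp [hi] at hrow'
        simp only [PySem.List.pyGet?] at hrow
        cases hpi : PySem.List.pyIdx? p.length a with
        | none => simp [hpi] at hrow
        | some ka =>
          simp [hpi] at hrow
          simp only [Option.map_some, Option.getD_some]
          by_cases hka : ka < p.length
          · by_cases ht : t = ka
            · subst ht
              rw [List.getD_eq_getElem _ _ (by simpa), List.getElem_set_self]
              rw [List.getD_eq_getElem _ _ hka]
              rw [← hrow']
              simp
              rw [List.getElem?_eq_getElem hka] at hrow
              simp at hrow
              rw [hrow]
            · rw [List.getD, List.getElem?_set_ne (by omega), ← List.getD]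
          · rw [List.set_eq_of_length_le (by omega)]

-- Python index facts, read-after-write, and shape invariance
theorem pvIdx_eq (n : Nat) (a : Int) (h1 : -(n : Int) ≤ a) (h2 : a < n) :
    PySem.List.pyIdx? n a = some (if a < 0 then a + n else a).toNat := by
  simp only [PySem.List.pyIdx?]
  split_ifs <;> first
  | (rw [Option.some.injEq]; omega)
  | omega
  | rfl

-- structured access facts under pvInR
theorem pvAccess (p : List (List Int)) (a b : Int) (hin : pvInR p (a, b)) :
    ∃ (I J : Int) (row : List Int),
      pvPos p a b = (I, J) ∧ 0 ≤ I ∧ I.toNat < p.length ∧ 0 ≤ J ∧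
      row = p.getD I.toNat [] ∧ J.toNat < row.length ∧
      PySem.List.pyIdx? p.length a = some I.toNat ∧
      PySem.List.pyIdx? row.length b = some J.toNat := by
  obtain ⟨h1, h2, h3, h4⟩ := hin
  simp only at h1 h2 h3 h4
  have hI0 : 0 ≤ (if a < 0 then a + (p.length : Int) else a) := by split <;> omega
  have hIlt : (if a < 0 then a + (p.length : Int) else a).toNat < p.length := by split <;> omega
  have hrowGet : (PySem.List.pyGet? p (if a < 0 then a + (p.length : Int) else a)).getD [] =
      p.getD (if a < 0 then a + (p.length : Int) else a).toNat [] := by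
    rw [PySem.List.pyGet?_of_nonneg _ hI0, List.getElem?_eq_getElem hIlt,
        List.getD_eq_getElem _ _ hIlt]
    simp
  have hJ0 : 0 ≤ (if b < 0 then b + (((p.getD (if a < 0 then a + (p.length : Int) else a).toNat []).length : Int)) else b) := by
    split <;> omega
  have hJlt : (if b < 0 then b + (((p.getD (if a < 0 then a + (p.length : Int) else a).toNat []).length : Int)) else b).toNat
      < (p.getD (if a < 0 then a + (p.length : Int) else a).toNat []).length := by
    split <;> omega
  refine ⟨_, _, _, ?_, hI0, hIlt, hJ0, rfl, hJlt, pvIdx_eq _ _ h1 h2, ?_⟩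
  · simp only [pvPos, hrowGet]
  · exact pvIdx_eq _ _ h3 h4

theorem pvSetIJ_repr (p : List (List Int)) (a b v : Int) (hin : pvInR p (a, b)) :
    pvSetIJ p a b v = p.set (pvPos p a b).1.toNat
      ((p.getD (pvPos p a b).1.toNat []).set (pvPos p a b).2.toNat v) := by
  obtain ⟨I, J, row, hpos, hI0, hIlt, hJ0, hrow, hJlt, hidxa, hidxb⟩ := pvAccess p a b hin
  have hget : PySem.List.pyGet? p a = some row := by
    simp only [PySem.List.pyGet?, hidxa, Option.bind_some]
    rw [hrow, List.getD_eq_getElem _ _ hIlt]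
    exact List.getElem?_eq_getElem hIlt
  have hsetrow : PySem.List.pySet? row b v = some (row.set J.toNat v) := by
    simp only [PySem.List.pySet?, hidxb, Option.map_some]
  have hsetp : PySem.List.pySet? p a (row.set J.toNat v) =
      some (p.set I.toNat (row.set J.toNat v)) := by
    simp only [PySem.List.pySet?, hidxa, Option.map_some]
  unfold pvSetIJ
  rw [hget]
  simp only [hsetrow, hsetp, Option.getD_some, hpos]
  rw [hrow]

theorem pvGetIJ_nat (p : List (List Int)) (i j : Int) (hi : 0 ≤ i) (hj : 0 ≤ j) :
    pvGetIJ p i j = ((p.getD i.toNat [])[j.toNat]?).getD 0 := by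
  unfold pvGetIJ
  rw [PySem.List.pyGet?_of_nonneg _ hi]
  by_cases hil : i.toNat < p.length
  · rw [List.getElem?_eq_getElem hil]
    simp only [Option.bind_some]
    rw [PySem.List.pyGet?_of_nonneg _ hj, List.getD_eq_getElem _ _ hil]
  · rw [List.getElem?_eq_none (by omega)]
    rw [List.getD_eq_default _ _ (by omega)]
    simp

theorem pvGetIJ_pos (p : List (List Int)) (a b : Int) (hin : pvInR p (a, b)) :
    pvGetIJ p a b = pvGetIJ p (pvPos p a b).1 (pvPos p a b).2 := by
  obtain ⟨I, J, row, hpos, hI0, hIlt, hJ0, hrow, hJlt, hidxa, hidxb⟩ := pvAccess p a b hin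
  have hget : PySem.List.pyGet? p a = some row := by
    simp only [PySem.List.pyGet?, hidxa, Option.bind_some]
    rw [hrow, List.getD_eq_getElem _ _ hIlt]
    exact List.getElem?_eq_getElem hIlt
  have hgetrow : PySem.List.pyGet? row b = row[J.toNat]? := by
    simp only [PySem.List.pyGet?, hidxb, Option.bind_some]
  rw [hpos]
  unfold pvGetIJ
  rw [hget]
  simp only [Option.bind_some]
  rw [hgetrow, PySem.List.pyGet?_of_nonneg _ hI0, List.getElem?_eq_getElem hIlt]
  simp only [Option.bind_some]
  rw [PySem.List.pyGet?_of_nonneg _ hJ0]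
  rw [hrow, List.getD_eq_getElem _ _ hIlt]

theorem pvGetIJ_setIJ (p : List (List Int)) (a b v i j : Int) (hin : pvInR p (a, b))
    (hi : 0 ≤ i) (hj : 0 ≤ j) :
    pvGetIJ (pvSetIJ p a b v) i j = if (i, j) = pvPos p a b then v else pvGetIJ p i j := by
  obtain ⟨I, J, row, hpos, hI0, hIlt, hJ0, hrow, hJlt, hidxa, hidxb⟩ := pvAccess p a b hin
  rw [pvSetIJ_repr p a b v hin, hpos] at *
  simp only at *
  rw [pvGetIJ_nat _ _ _ hi hj, pvGetIJ_nat _ _ _ hi hj]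
  by_cases hiI : i = I
  · subst hiI
    have : (p.set i.toNat ((p.getD i.toNat []).set J.toNat v)).getD i.toNat [] =
        (p.getD i.toNat []).set J.toNat v := by
      rw [List.getD_eq_getElem _ _ (by simpa using hIlt), List.getElem_set_self]
    rw [this]
    by_cases hjJ : j = J
    · subst hjJ
      rw [List.getElem?_set_self (by rw [← hrow]; omega)]
      simp
    · have : J.toNat ≠ j.toNat := by omega
      rw [List.getElem?_set_ne this]
      simp [hjJ]
  · rw [if_neg (by simp [hiI] : ¬ ((i, j) = (I, J)))]
    have hne : i.toNat ≠ I.toNat := by omega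
    have : (p.set I.toNat ((p.getD I.toNat []).set J.toNat v)).getD i.toNat [] = p.getD i.toNat [] := by
      by_cases hil : i.toNat < p.length
      · rw [List.getD_eq_getElem _ _ (by simpa using hil), List.getElem_set_ne (by omega),
            List.getD_eq_getElem _ _ hil]
      · rw [List.getD_eq_default _ _ (by simpa using (by omega : ¬ i.toNat < p.length)),
            List.getD_eq_default _ _ (by omega)]
    rw [this]

-- shape invariance of pvPos / pvInR
theorem pvPos_shape (p q : List (List Int)) (a b : Int)
    (hlen : q.length = p.length) (hrow : ∀ t : Nat, (q.getD t []).length = (p.getD t []).length) :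
    pvPos q a b = pvPos p a b := by
  have hget : ∀ i2 : Int, ((PySem.List.pyGet? q i2).getD []).length = ((PySem.List.pyGet? p i2).getD []).length := by
    intro i2
    simp only [PySem.List.pyGet?, hlen]
    cases hk : PySem.List.pyIdx? p.length i2 with
    | none => simp
    | some k =>
      simp only [Option.bind_some]
      by_cases hkl : k < p.length
      · rw [List.getElem?_eq_getElem (by omega), List.getElem?_eq_getElem hkl]
        have := hrow k
        rw [List.getD_eq_getElem _ _ (by omega), List.getD_eq_getElem _ _ hkl] at this
        simpa using this
      · rw [List.getElem?_eq_none (by omega), List.getElem?_eq_none (by omega)]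
  simp only [pvPos, hlen, hget]

theorem pvInR_shape (p q : List (List Int)) (c : Int × Int)
    (hlen : q.length = p.length) (hrow : ∀ t : Nat, (q.getD t []).length = (p.getD t []).length)
    (h : pvInR p c) : pvInR q c := by
  obtain ⟨h1, h2, h3, h4⟩ := h
  exact ⟨by rw [hlen]; exact h1, by rw [hlen]; exact h2,
    by rw [hlen, hrow]; exact h3, by rw [hlen, hrow]; exact h4⟩

theorem pvNetF_nil (p : List (List Int)) (k0 : Int) (c : Int × Int) : pvNetF p [] k0 c = 0 := rfl

theorem pvNetF_cons (p : List (List Int)) (c0 : Int × Int) (cs : List (Int × Int)) (k0 : Int) (c : Int × Int) :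
    pvNetF p (c0 :: cs) k0 c = (if pvPos p c0.1 c0.2 = c then pvCoef k0 else 0) + pvNetF p cs (k0 + 1) c := by
  simp [pvNetF, PySem.List.enumerate_cons]

-- count of cells addressing a given matrix position
def pvCntF (p : List (List Int)) (cs : List (Int × Int)) (c : Int × Int) : Int :=
  ((cs.map (fun c0 => if pvPos p c0.1 c0.2 = c then (1 : Int) else 0)).sum)

theorem pvCntF_nil (p : List (List Int)) (c : Int × Int) : pvCntF p [] c = 0 := rfl

theorem pvCntF_cons (p : List (List Int)) (c0 : Int × Int) (cs : List (Int × Int)) (c : Int × Int) :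
    pvCntF p (c0 :: cs) c = (if pvPos p c0.1 c0.2 = c then (1 : Int) else 0) + pvCntF p cs c := by
  simp [pvCntF]

-- the net ±1 coefficient over the enumerated cycle is (#even-position visits) - (#odd-position visits)
theorem pvNetF_split (p : List (List Int)) (l : List (Int × Int)) (s : Nat) (c : Int × Int) :
    pvNetF p l (2 * (s : Int)) c = pvCntF p (pvEveryOther l) c - pvCntF p (pvEveryOther (l.drop 1)) c := by
  induction l using pvEveryOther.induct generalizing s with
  | case1 => simp [pvNetF_nil, pvEveryOther, pvCntF_nil]
  | case2 x =>
    have h0 : pvCoef (2 * (s : Int)) = 1 := by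
      unfold pvCoef
      rw [PySem.Int.mod_eq_emod_of_pos (by omega)]
      simp [Int.mul_emod_right]
    simp [pvEveryOther, pvNetF_cons, pvNetF_nil, pvCntF_cons, pvCntF_nil, h0]
  | case3 x y r ih =>
    have h0 : pvCoef (2 * (s : Int)) = 1 := by
      unfold pvCoef
      rw [PySem.Int.mod_eq_emod_of_pos (by omega)]
      simp [Int.mul_emod_right]
    have h1 : pvCoef (2 * (s : Int) + 1) = -1 := by
      unfold pvCoef
      rw [PySem.Int.mod_eq_emod_of_pos (by omega)]
      have hm : (2 * (s : Int) + 1) % 2 = 1 := by omega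
      simp [hm]
    have h2 : 2 * (s : Int) + 1 + 1 = 2 * ((s + 1 : Nat) : Int) := by push_cast; ring
    rw [pvNetF_cons, pvNetF_cons, h2, ih (s + 1)]
    rw [show pvEveryOther (x :: y :: r) = x :: pvEveryOther r from rfl]
    rw [show (x :: y :: r).drop 1 = y :: r from rfl, pvEveryOther_cons]
    rw [pvCntF_cons, pvCntF_cons, h0, h1]
    split_ifs <;> ring

theorem pvFold_shape (delta : Int) (cells : List (Int × Int)) (k0 : Int) (p : List (List Int)) :
    ((PySem.List.enumerate cells k0).foldl (fun p kc =>
      if PySem.Int.mod kc.1 2 == 0 then pvSetIJ p kc.2.1 kc.2.2 (pvGetIJ p kc.2.1 kc.2.2 + delta)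
      else pvSetIJ p kc.2.1 kc.2.2 (pvGetIJ p kc.2.1 kc.2.2 - delta)) p).length = p.length ∧
    ∀ t : Nat, (((PySem.List.enumerate cells k0).foldl (fun p kc =>
      if PySem.Int.mod kc.1 2 == 0 then pvSetIJ p kc.2.1 kc.2.2 (pvGetIJ p kc.2.1 kc.2.2 + delta)
      else pvSetIJ p kc.2.1 kc.2.2 (pvGetIJ p kc.2.1 kc.2.2 - delta)) p).getD t []).length = (p.getD t []).length := by
  induction cells generalizing p k0 with
  | nil => simp [PySem.List.enumerate]
  | cons c0 cs ih =>
    rw [PySem.List.enumerate_cons]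
    simp only [List.foldl_cons]
    constructor
    · rw [(ih (k0 + 1) _).1]
      split <;> rw [pvSetIJ_length]
    · intro t
      rw [(ih (k0 + 1) _).2 t]
      split <;> rw [pvSetIJ_row_length]

-- shape invariance of B's plain add-fold
theorem pvFoldAdd_shape (v : Int) (cs : List (Int × Int)) (p : List (List Int)) :
    ((cs.foldl (fun q c => pvSetIJ q c.1 c.2 (pvGetIJ q c.1 c.2 + v)) p).length = p.length) ∧
    ∀ t : Nat, ((cs.foldl (fun q c => pvSetIJ q c.1 c.2 (pvGetIJ q c.1 c.2 + v)) p).getD t []).length = (p.getD t []).length := by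
  induction cs generalizing p with
  | nil => simp
  | cons c0 cs ih =>
    simp only [List.foldl_cons]
    exact ⟨by rw [(ih _).1, pvSetIJ_length], fun t => by rw [(ih _).2 t, pvSetIJ_row_length]⟩

-- each entry of A's fold moves by delta * the net coefficient of its matrix position
theorem pvFold_entry (delta : Int) (cells : List (Int × Int)) (k0 : Int) (p q : List (List Int))
    (hlen : q.length = p.length) (hrowl : ∀ t : Nat, (q.getD t []).length = (p.getD t []).length)
    (hin : ∀ c ∈ cells, pvInR p c) (i j : Int) (hi : 0 ≤ i) (hj : 0 ≤ j) :
    pvGetIJ ((PySem.List.enumerate cells k0).foldl (fun p kc =>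
      if PySem.Int.mod kc.1 2 == 0 then pvSetIJ p kc.2.1 kc.2.2 (pvGetIJ p kc.2.1 kc.2.2 + delta)
      else pvSetIJ p kc.2.1 kc.2.2 (pvGetIJ p kc.2.1 kc.2.2 - delta)) q) i j
      = pvGetIJ q i j + delta * pvNetF p cells k0 (i, j) := by
  induction cells generalizing q k0 with
  | nil => simp [PySem.List.enumerate, pvNetF_nil]
  | cons c0 cs ih =>
    rw [PySem.List.enumerate_cons]
    simp only [List.foldl_cons]
    obtain ⟨a0, b0⟩ := c0
    have hstep : (if PySem.Int.mod k0 2 == 0 then pvSetIJ q a0 b0 (pvGetIJ q a0 b0 + delta)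
        else pvSetIJ q a0 b0 (pvGetIJ q a0 b0 - delta))
        = pvSetIJ q a0 b0 (pvGetIJ q a0 b0 + pvCoef k0 * delta) := by
      unfold pvCoef
      split
      · rw [one_mul]
      · rw [neg_one_mul, ← sub_eq_add_neg]
    rw [hstep]
    have hinP : pvInR p (a0, b0) := hin _ (by simp)
    have hinQ : pvInR q (a0, b0) := pvInR_shape p q _ hlen hrowl hinP
    have hlen' : (pvSetIJ q a0 b0 (pvGetIJ q a0 b0 + pvCoef k0 * delta)).length = p.length := by
      rw [pvSetIJ_length, hlen]
    have hrowl' : ∀ t : Nat, ((pvSetIJ q a0 b0 (pvGetIJ q a0 b0 + pvCoef k0 * delta)).getD t []).length = (p.getD t []).length := by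
      intro t; rw [pvSetIJ_row_length, hrowl]
    rw [ih (k0 + 1) _ hlen' hrowl' (fun c hc => hin c (by simp [hc]))]
    rw [pvGetIJ_setIJ q a0 b0 _ i j hinQ hi hj]
    rw [pvPos_shape p q a0 b0 hlen hrowl]
    rw [pvNetF_cons]
    by_cases hc : pvPos p a0 b0 = (i, j)
    · rw [if_pos hc.symm, if_pos hc]
      have : pvGetIJ q a0 b0 = pvGetIJ q i j := by
        rw [pvGetIJ_pos q a0 b0 hinQ, pvPos_shape p q a0 b0 hlen hrowl, hc]
      rw [this]; ring
    · rw [if_neg (fun h => hc h.symm), if_neg hc]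
      ring

-- each entry of B's plain add-fold moves by v * the number of cells addressing its position
theorem pvFoldAdd_entry (v : Int) (cs : List (Int × Int)) (p q : List (List Int))
    (hlen : q.length = p.length) (hrowl : ∀ t : Nat, (q.getD t []).length = (p.getD t []).length)
    (hin : ∀ c ∈ cs, pvInR p c) (i j : Int) (hi : 0 ≤ i) (hj : 0 ≤ j) :
    pvGetIJ (cs.foldl (fun q c => pvSetIJ q c.1 c.2 (pvGetIJ q c.1 c.2 + v)) q) i j
      = pvGetIJ q i j + v * pvCntF p cs (i, j) := by
  induction cs generalizing q with
  | nil => simp [pvCntF_nil]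
  | cons c0 cs ih =>
    simp only [List.foldl_cons]
    obtain ⟨a0, b0⟩ := c0
    have hinP : pvInR p (a0, b0) := hin _ (by simp)
    have hinQ : pvInR q (a0, b0) := pvInR_shape p q _ hlen hrowl hinP
    have hlen' : (pvSetIJ q a0 b0 (pvGetIJ q a0 b0 + v)).length = p.length := by
      rw [pvSetIJ_length, hlen]
    have hrowl' : ∀ t : Nat, ((pvSetIJ q a0 b0 (pvGetIJ q a0 b0 + v)).getD t []).length = (p.getD t []).length := by
      intro t; rw [pvSetIJ_row_length, hrowl]
    rw [ih _ hlen' hrowl' (fun c hc => hin c (by simp [hc]))]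
    rw [pvGetIJ_setIJ q a0 b0 _ i j hinQ hi hj]
    rw [pvPos_shape p q a0 b0 hlen hrowl]
    rw [pvCntF_cons]
    by_cases hc : pvPos p a0 b0 = (i, j)
    · rw [if_pos hc.symm, if_pos hc]
      have : pvGetIJ q a0 b0 = pvGetIJ q i j := by
        rw [pvGetIJ_pos q a0 b0 hinQ, pvPos_shape p q a0 b0 hlen hrowl, hc]
      rw [this]; ring
    · rw [if_neg (fun h => hc h.symm), if_neg hc]
      ring

theorem pvFilterMapOdd_eq' (p : List (List Int)) (l : List (Int × Int)) :
    (PySem.List.enumerate l 0).filterMap (fun kc =>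
      if PySem.Int.mod kc.1 2 == 1 then some (pvGetIJ p kc.2.1 kc.2.2) else none) =
    (pvEveryOther (l.drop 1)).map (fun c => pvGetIJ p c.1 c.2) :=
  pvFilterMapOdd_eq l (fun c => pvGetIJ p c.1 c.2)

theorem pvRemoveA_eq_B (p : List (List Int)) (cyc : List (Int × Int)) (ks : List Int) (s : List (Int × Int)) :
    pvRemoveA p cyc ks s = pvRemoveB p (ks.map (fun k => PySem.List.pyGetD cyc k (0, 0))) s := by
  induction ks with
  | nil => rfl
  | cons k rest ih => simp only [pvRemoveA, pvRemoveB, List.map_cons]; split <;> simp [ih]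

-- the central step: A's enumerated ±delta fold equals B's evens-then-odds two-fold
theorem pvCore (p : List (List Int)) (rot : List (Int × Int)) (s : List (Int × Int))
    (hin : ∀ c ∈ rot, pvInR p c) :
    (let delta := (PySem.List.min? ((PySem.List.enumerate rot 0).filterMap (fun kc =>
        if PySem.Int.mod kc.1 2 == 1 then some (pvGetIJ p kc.2.1 kc.2.2) else none)) (fun x => x)).getD 0
     let p2 := (PySem.List.enumerate rot 0).foldl (fun q kc =>
        if PySem.Int.mod kc.1 2 == 0 then pvSetIJ q kc.2.1 kc.2.2 (pvGetIJ q kc.2.1 kc.2.2 + delta)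
        else pvSetIJ q kc.2.1 kc.2.2 (pvGetIJ q kc.2.1 kc.2.2 - delta)) p
     ((p2, pvRemoveA p2 rot (PySem.List.pyRange 1 (rot.length : Int) 2) s) : List (List Int) × List (Int × Int)))
    = (let evens := (PySem.List.slice? rot (some 0) none 2).getD []
       let odds := (PySem.List.slice? rot (some 1) none 2).getD []
       let delta := (PySem.List.min? (odds.map (fun c => pvGetIJ p c.1 c.2)) (fun x => x)).getD 0
       let p1 := evens.foldl (fun q c => pvSetIJ q c.1 c.2 (pvGetIJ q c.1 c.2 + delta)) p
       let p2 := odds.foldl (fun q c => pvSetIJ q c.1 c.2 (pvGetIJ q c.1 c.2 - delta)) p1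
       (p2, pvRemoveB p2 odds s)) := by
  simp only [pvOddsSlice_eq, pvEvensSlice_eq, pvFilterMapOdd_eq']
  set delta := (PySem.List.min? ((pvEveryOther (rot.drop 1)).map (fun c => pvGetIJ p c.1 c.2)) (fun x => x)).getD 0 with hdelta
  have hsub : ∀ (cs : List (Int × Int)) (q : List (List Int)),
      cs.foldl (fun q c => pvSetIJ q c.1 c.2 (pvGetIJ q c.1 c.2 - delta)) q
      = cs.foldl (fun q c => pvSetIJ q c.1 c.2 (pvGetIJ q c.1 c.2 + (-delta))) q := by
    intro cs q; simp only [sub_eq_add_neg]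
  set p2A := (PySem.List.enumerate rot 0).foldl (fun q kc =>
        if PySem.Int.mod kc.1 2 == 0 then pvSetIJ q kc.2.1 kc.2.2 (pvGetIJ q kc.2.1 kc.2.2 + delta)
        else pvSetIJ q kc.2.1 kc.2.2 (pvGetIJ q kc.2.1 kc.2.2 - delta)) p with hp2A
  set p1B := (pvEveryOther rot).foldl (fun q c => pvSetIJ q c.1 c.2 (pvGetIJ q c.1 c.2 + delta)) p with hp1B
  set p2B := (pvEveryOther (rot.drop 1)).foldl (fun q c => pvSetIJ q c.1 c.2 (pvGetIJ q c.1 c.2 - delta)) p1B with hp2B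
  have hinE : ∀ c ∈ pvEveryOther rot, pvInR p c := fun c hc => hin c (pvEveryOther_subset _ _ hc)
  have hinO : ∀ c ∈ pvEveryOther (rot.drop 1), pvInR p c := fun c hc =>
    hin c (List.mem_of_mem_drop (pvEveryOther_subset _ _ hc))
  have hshapeA := pvFold_shape delta rot 0 p
  have hshape1 := pvFoldAdd_shape delta (pvEveryOther rot) p
  have hshape2' := pvFoldAdd_shape (-delta) (pvEveryOther (rot.drop 1)) p1B
  have hshape2 : p2B.length = p.length ∧ ∀ t : Nat, (p2B.getD t []).length = (p.getD t []).length := by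
    rw [hp2B, hsub]
    exact ⟨by rw [hshape2'.1, hshape1.1], fun t => by rw [hshape2'.2 t, hshape1.2 t]⟩
  have hmat : p2A = p2B := by
    apply List.ext_getElem
    · rw [hshapeA.1, hshape2.1]
    · intro i h1 h2
      have hip : i < p.length := by rwa [hshapeA.1] at h1
      have hrlA : p2A[i].length = (p[i]'hip).length := by
        rw [← List.getD_eq_getElem p2A [] h1, hshapeA.2 i, List.getD_eq_getElem p [] hip]
      have hrlB : p2B[i].length = (p[i]'hip).length := by
        rw [← List.getD_eq_getElem p2B [] h2, hshape2.2 i, List.getD_eq_getElem p [] hip]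
      apply List.ext_getElem
      · rw [hrlA, hrlB]
      · intro j hj1 hj2
        have hjp : j < (p[i]'hip).length := by rwa [hrlA] at hj1
        have hgA : p2A[i][j] = pvGetIJ p2A (i : Int) (j : Int) := by
          unfold pvGetIJ
          simp only [PySem.List.pyGet?_natCast]
          rw [List.getElem?_eq_getElem h1]
          simp only [Option.bind_some]
          rw [List.getElem?_eq_getElem hj1]
          simp
        have hgB : p2B[i][j] = pvGetIJ p2B (i : Int) (j : Int) := by
          unfold pvGetIJ
          simp only [PySem.List.pyGet?_natCast]
          rw [List.getElem?_eq_getElem h2]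
          simp only [Option.bind_some]
          rw [List.getElem?_eq_getElem hj2]
          simp
        rw [hgA, hgB, hp2A,
          pvFold_entry delta rot 0 p p rfl (fun t => rfl) hin (i : Int) (j : Int) (by omega) (by omega)]
        rw [hp2B, hsub,
          pvFoldAdd_entry (-delta) (pvEveryOther (rot.drop 1)) p p1B
            (by rw [hshape1.1]) (fun t => hshape1.2 t) hinO (i : Int) (j : Int) (by omega) (by omega)]
        rw [hp1B,
          pvFoldAdd_entry delta (pvEveryOther rot) p p rfl (fun t => rfl) hinE (i : Int) (j : Int) (by omega) (by omega)]
        have hsplit := pvNetF_split p rot 0 ((i : Int), (j : Int))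
        rw [show (2 * ((0 : Nat) : Int)) = 0 by norm_num] at hsplit
        rw [hsplit]
        ring
  have hrem : pvRemoveA p2A rot (PySem.List.pyRange 1 (rot.length : Int) 2) s
      = pvRemoveB p2B (pvEveryOther (rot.drop 1)) s := by
    rw [pvRemoveA_eq_B, pvRangeOdd_map, hmat]
  rw [hmat] at hrem ⊢
  rw [hrem]

-- ===== VERDICT (by name: the statement is the Claim_ definition above) =====
theorem fix_cycles_spec : Claim_equal_fix_cycles := by
  intro proposal cycle_nodes n basic_cells_set best_cell _hdom hpre
  unfold Spec_fix_cycles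
  unfold fix_cycles fix_cycles_alt
  rw [pvCells_eq]
  obtain ⟨-, hin, -⟩ := hpre
  set cells := (cycle_nodes.zip (cycle_nodes.drop 1)).map (fun ab =>
      if ab.1 < n then (ab.1, ab.2 - n) else (ab.2, ab.1 - n)) with hcells
  set rot := (if best_cell ∈ cells then
      PySem.List.slice cells (some (((PySem.List.index? cells best_cell).getD 0 : Nat) : Int)) none ++
      PySem.List.slice cells none (some (((PySem.List.index? cells best_cell).getD 0 : Nat) : Int))
    else cells) with hrot
  have hinrot : ∀ c ∈ rot, pvInR proposal c := by
    intro c hc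
    have hmem : c ∈ cells := by
      rw [hrot] at hc
      split at hc
      · rcases List.mem_append.1 hc with h | h
        · exact PySem.List.mem_of_mem_slice _ _ _ h
        · exact PySem.List.mem_of_mem_slice _ _ _ h
      · exact hc
    exact hin c hmem
  exact pvCore proposal rot basic_cells_set hinrot
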